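-- pv_equiv track=rewrite | github.com/jimazeyu/spanning_tree_coverage | STC.py | dfs_visit_order
-- ===== SOURCE A (Python) =====
-- def dfs_visit_order(start, path_from):
--     """
--     Determine the visit order of cells using depth-first search (DFS).
--     - start: Starting cell coordinates for DFS.
--     - path_from: Dictionary mapping each cell to the cell it was visited from.
--     Returns a dictionary where keys are cell coordinates and values are the order in which cells were visited.
--     """
--     visit_order = {}
--     order = 1
--     stack = [start]
--
--     while stack:
--         node = stack.pop()
--         if node not in visit_order:
--             visit_order[node] = order
--             order += 1
--
--             for next_node in [neigh for neigh in path_from if path_from[neigh] == node]: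
--                 stack.append(next_node)
--
--     return visit_order
-- ===== SOURCE B (Python) =====
-- def dfs_visit_order(start, path_from):
--     # Build a parent -> children adjacency map once, then run the DFS with a
--     # stack of FRAMES (remaining-children lists, emulating the recursion),
--     # instead of A's node stack with a full rescan of the dict at every visit.
--     children = {}
--     for k, p in path_from.items():
--         children.setdefault(p, []).append(k)
--     visit_order = {start: 1}
--     order = 2
--     frames = [children.get(start, [])[:]]
--     while frames:
--         while frames and not frames[-1]:
--             frames.pop()
--         if not frames:
--             break
--         c = frames[-1].pop()
--         if c not in visit_order:
--             visit_order[c] = order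
--             order += 1
--             frames.append(children.get(c, [])[:])
--     return visit_order
-- ===== Notes on version B (the rewrite author's own statement) =====
-- stated objective: alternative
-- what changed: B precomputes a parent-to-children adjacency map in one pass and runs the DFS with a stack of remaining-children frames (an emulated recursion), instead of A's node stack that rescans the whole dict at every newly visited node.
import Mathlib
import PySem

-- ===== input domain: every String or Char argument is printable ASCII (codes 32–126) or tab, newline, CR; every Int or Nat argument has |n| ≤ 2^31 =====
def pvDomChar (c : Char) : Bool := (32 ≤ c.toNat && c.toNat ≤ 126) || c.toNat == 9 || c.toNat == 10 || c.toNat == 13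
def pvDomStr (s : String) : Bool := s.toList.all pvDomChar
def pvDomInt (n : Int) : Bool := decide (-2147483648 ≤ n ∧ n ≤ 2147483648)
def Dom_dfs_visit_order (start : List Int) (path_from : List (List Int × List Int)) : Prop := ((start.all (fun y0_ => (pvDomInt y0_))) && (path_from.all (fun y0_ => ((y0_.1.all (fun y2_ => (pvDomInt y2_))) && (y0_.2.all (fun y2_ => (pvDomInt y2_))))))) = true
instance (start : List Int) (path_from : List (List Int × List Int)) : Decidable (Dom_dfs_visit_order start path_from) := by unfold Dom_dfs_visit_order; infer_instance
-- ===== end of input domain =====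

-- B builds a parent->children adjacency map once and runs the DFS with a stack of remaining-children frames (emulated recursion), instead of A's node stack with a full dict rescan at every visit.


-- ===== PORT A =====
-- Stack is represented with the HEAD as Python's list end (stack.pop() = head, appends = reversed prepend).
-- The while-loop is given fuel path_from.length + 1: each pair's key is pushed at most once (when its parent
-- is first visited), so pops ≤ pushes + 1 ≤ path_from.length + 1 and the fuel never runs out in Python's runs.
-- '[neigh for neigh in path_from if path_from[neigh] == node]': keys in insertion order whose value equals node.
def pvLoopA (path_from : List (List Int × List Int)) :
    Nat → List (List Int) → PySem.Dict (List Int) Int → Int → PySem.Dict (List Int) Int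
  | 0, _, visit, _ => visit
  | _ + 1, [], visit, _ => visit
  | fuel + 1, node :: rest, visit, order =>
    if visit.contains node then
      pvLoopA path_from fuel rest visit order
    else
      pvLoopA path_from fuel
        (((path_from.filter (fun p => p.2 == node)).map (·.1)).reverse ++ rest)
        (visit.insert node order) (order + 1)

def dfs_visit_order (start : List Int) (path_from : List (List Int × List Int)) : List (List Int × Int) :=
  (pvLoopA path_from (path_from.length + 1) [start] PySem.Dict.empty 1).items

-- ===== PORT B =====
-- children = {}; for k, p in path_from.items(): children.setdefault(p, []).append(k)
def pvChildren (path_from : List (List Int × List Int)) : PySem.Dict (List Int) (List (List Int)) :=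
  path_from.foldl (fun d p => d.modify p.2 [] (· ++ [p.1])) PySem.Dict.empty

-- Each frame is one copied children bucket, REVERSED so that Python's bucket.pop() (take from the end)
-- is the head here; the frame stack's top (frames[-1]) is the head of the list of frames.
-- Inner 'while frames and not frames[-1]: frames.pop()' = drop the leading exhausted frames:
def pvDrop : List (List (List Int)) → List (List (List Int))
  | [] => []
  | [] :: rest => pvDrop rest
  | (c :: cs) :: rest => (c :: cs) :: rest

-- Outer while-loop with fuel path_from.length: every iteration that recurses consumes one bucket entry,
-- each bucket is pushed at most once (its node is visited once), and the buckets hold path_from.length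
-- entries in total; when fuel runs out only exhausted frames remain, so returning visit is Python's result.
def pvLoopB (children : PySem.Dict (List Int) (List (List Int))) :
    Nat → List (List (List Int)) → PySem.Dict (List Int) Int → Int → PySem.Dict (List Int) Int
  | 0, _, visit, _ => visit
  | fuel + 1, frames, visit, order =>
    match pvDrop frames with
    | [] => visit
    | [] :: _ => visit  -- unreachable: pvDrop never leaves an empty frame on top
    | (c :: cs) :: rest =>
      if visit.contains c then
        pvLoopB children fuel (cs :: rest) visit order
      else
        pvLoopB children fuel ((children.getD c []).reverse :: cs :: rest)
          (visit.insert c order) (order + 1)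

def dfs_visit_order_alt (start : List Int) (path_from : List (List Int × List Int)) : List (List Int × Int) :=
  let children := pvChildren path_from
  (pvLoopB children path_from.length [(children.getD start []).reverse]
    (PySem.Dict.empty.insert start 1) 2).items

-- ===== PRECONDITION & SPEC =====
def Spec_dfs_visit_order (start : List Int) (path_from : List (List Int × List Int)) (out : List (List Int × Int)) : Prop := out = dfs_visit_order_alt start path_from
instance (start : List Int) (path_from : List (List Int × List Int)) (out : List (List Int × Int)) : Decidable (Spec_dfs_visit_order start path_from out) := by unfold Spec_dfs_visit_order; infer_instance

-- ===== CLAIM =====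
def Claim_equal_dfs_visit_order : Prop := ∀ (start : List Int) (path_from : List (List Int × List Int)), Dom_dfs_visit_order start path_from → Spec_dfs_visit_order start path_from (dfs_visit_order start path_from)

-- ===== LEMMAS AND PROOFS =====

-- The precomputed bucket of a node is exactly A's per-visit scan result.
theorem pvChildren_getD (path_from : List (List Int × List Int)) (node : List Int) :
    (pvChildren path_from).getD node [] = (path_from.filter (fun p => p.2 == node)).map (·.1) := by
  have h : pvChildren path_from
      = (path_from.map (fun p => (p.2, p.1))).foldl
          (fun d q => d.modify q.1 [] (· ++ [q.2])) PySem.Dict.empty := by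
    simp [pvChildren, List.foldl_map]
  rw [h, PySem.Dict.getD_foldl_modify_append]
  rw [PySem.Dict.getD_empty]
  simp only [List.filter_map, List.map_map]
  rfl

theorem pvDrop_flatten (fs : List (List (List Int))) : (pvDrop fs).flatten = fs.flatten := by
  induction fs with
  | nil => rfl
  | cons f rest ih => cases f with
    | nil => simpa [pvDrop] using ih
    | cons c cs => rfl

-- Simulation: A's node stack is the flattening of B's frame stack.
theorem pvLoop_sim (path_from : List (List Int × List Int)) :
    ∀ (fuel : Nat) (frames : List (List (List Int))) (visit : PySem.Dict (List Int) Int) (order : Int),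
      pvLoopA path_from fuel frames.flatten visit order
        = pvLoopB (pvChildren path_from) fuel frames visit order := by
  intro fuel
  induction fuel with
  | zero => intro frames visit order; rfl
  | succ n ih =>
    intro frames visit order
    have hflat := pvDrop_flatten frames
    rcases hd : pvDrop frames with _ | ⟨f, rest⟩
    · have : frames.flatten = [] := by rw [← hflat, hd]; rfl
      rw [this]
      simp [pvLoopA, pvLoopB, hd]
    · cases f with
      | nil =>
        -- impossible: pvDrop never returns an empty head
        exfalso
        clear hflat ih
        induction frames with
        | nil => simp [pvDrop] at hd
        | cons g gs ihg => cases g with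
          | nil => exact ihg (by simpa [pvDrop] using hd)
          | cons a as => simp [pvDrop] at hd
      | cons c cs =>
        have : frames.flatten = c :: (cs ++ rest.flatten) := by
          rw [← hflat, hd]; simp
        rw [this]
        by_cases h : visit.contains c
        · have hb := ih (cs :: rest) visit order
          simp only [List.flatten_cons] at hb
          simp [pvLoopA, pvLoopB, hd, h, hb]
        · have hb := ih (((pvChildren path_from).getD c []).reverse :: cs :: rest)
            (visit.insert c order) (order + 1)
          simp only [List.flatten_cons] at hb
          simpa [pvLoopA, pvLoopB, hd, h, pvChildren_getD] using hb

-- ===== VERDICT =====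
theorem dfs_visit_order_spec : Claim_equal_dfs_visit_order := by
  intro start path_from _
  unfold Spec_dfs_visit_order dfs_visit_order dfs_visit_order_alt
  have h0 : pvLoopA path_from (path_from.length + 1) [start] PySem.Dict.empty 1
      = pvLoopA path_from path_from.length
          (((path_from.filter (fun p => p.2 == start)).map (·.1)).reverse ++ [])
          (PySem.Dict.empty.insert start 1) 2 := by
    simp [pvLoopA, PySem.Dict.contains_empty]
  have hs := pvLoop_sim path_from path_from.length
    [((pvChildren path_from).getD start []).reverse] (PySem.Dict.empty.insert start 1) 2
  simp only [List.flatten_cons, List.flatten_nil, List.append_nil, pvChildren_getD] at hs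
  rw [h0]
  simp only [List.append_nil]
  rw [hs, pvChildren_getD]
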